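-- pv_equiv track=rewrite | github.com/collinsakenga/codewars_solutions | 6 kyu/6 kyu_Fat Fingers.py | fat_fingers
-- ===== SOURCE A (Python) =====
-- def fat_fingers(string):
--     res=""
--     flag=False
--     for i in string:
--         if i in "aA":
--             flag=not flag
--             continue
--         if not i.isalpha():
--             res+=i
--         else:
--             res+=i if not flag else i.lower() if i.isupper() else i.upper()
--     return res
-- ===== SOURCE B (Python) =====
-- def fat_fingers(string):
--     parts = string.replace('A', 'a').split('a')
--     out = []
--     for k, part in enumerate(parts):
--         if k % 2 == 0:
--             out.append(part)
--         else:
--             out.append(''.join(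
--                 ((c.lower() if c.isupper() else c.upper()) if c.isalpha() else c)
--                 for c in part))
--     return ''.join(out)
-- ===== Notes on version B (the rewrite author's own statement) =====
-- stated objective: alternative
-- what changed: Replaced the stateful single-pass toggle-flag scan by a split-then-map decomposition: normalise the toggle letter, split the string on it, and join the segments back with every odd-indexed segment case-flipped character by character.
import Mathlib
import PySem

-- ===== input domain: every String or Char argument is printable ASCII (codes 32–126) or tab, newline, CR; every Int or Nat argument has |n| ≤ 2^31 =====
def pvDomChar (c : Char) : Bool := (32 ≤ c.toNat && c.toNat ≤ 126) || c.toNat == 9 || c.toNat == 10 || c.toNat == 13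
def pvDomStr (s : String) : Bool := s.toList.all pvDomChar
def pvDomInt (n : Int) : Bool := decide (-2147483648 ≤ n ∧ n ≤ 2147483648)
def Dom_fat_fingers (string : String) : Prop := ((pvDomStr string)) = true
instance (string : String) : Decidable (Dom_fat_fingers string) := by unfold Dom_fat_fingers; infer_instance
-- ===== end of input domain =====

-- B replaces A's stateful flag scan by a split-on-'a'/'A' then case-flip the odd segments
-- decomposition (objective: alternative, same cost).

-- ===== PORT A =====
def fat_fingers (string : String) : String :=
  let r := string.toList.foldl
    (fun (st : List Char × Bool) i =>
      if i = 'a' || i = 'A' then (st.1, !st.2)                     -- i in "aA": toggle, continue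
      else if !(PySem.Chars.isalpha i) then (st.1 ++ [i], st.2)     -- res += i
      else (st.1 ++ [if !st.2 then i
                     else if PySem.Chars.isupper i then PySem.Chars.lowerChar i
                     else PySem.Chars.upperChar i], st.2))
    ([], false)
  String.mk r.1

-- ===== PORT B =====
-- per-char transform of Source B's inner join: (c.lower() if c.isupper() else c.upper()) if c.isalpha() else c
def pvFlip (c : Char) : Char :=
  if PySem.Chars.isalpha c then
    (if PySem.Chars.isupper c then PySem.Chars.lowerChar c else PySem.Chars.upperChar c)
  else c

def fat_fingers_alt (string : String) : String :=
  -- string.replace('A','a') with one-char arguments is exactly a per-char map;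
  -- str.split('a') with a one-char separator is exactly List.splitOn 'a' on the code points.
  let parts := (string.toList.map (fun c => if c = 'A' then 'a' else c)).splitOn 'a'
  String.mk (((PySem.List.enumerate parts).map
      (fun p => if p.1 % 2 == 0 then p.2 else p.2.map pvFlip)).flatten)

-- ===== PRECONDITION & SPEC =====
def Spec_fat_fingers (string : String) (out : String) : Prop := out = fat_fingers_alt string
instance (string : String) (out : String) : Decidable (Spec_fat_fingers string out) := by unfold Spec_fat_fingers; infer_instance

-- ===== CLAIM (what is proved, stated in full; the proofs are below) =====
def Claim_equal_fat_fingers : Prop := ∀ (string : String), Dom_fat_fingers string → Spec_fat_fingers string (fat_fingers string)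

-- ===== LEMMAS AND PROOFS =====

-- common specification: the flag machine written as structural recursion
def pvSpec : List Char → Bool → List Char
  | [], _ => []
  | i :: t, flag =>
    if i = 'a' || i = 'A' then pvSpec t (!flag)
    else (if flag then pvFlip i else i) :: pvSpec t flag

-- parity-join of the segment list, `f` = "flip this segment"
def pvJ : List (List Char) → Bool → List Char
  | [], _ => []
  | p :: ps, f => (if f then p.map pvFlip else p) ++ pvJ ps (!f)

theorem pvFoldA (l : List Char) : ∀ (res : List Char) (flag : Bool),
    (l.foldl
      (fun (st : List Char × Bool) i =>
        if i = 'a' || i = 'A' then (st.1, !st.2)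
        else if !(PySem.Chars.isalpha i) then (st.1 ++ [i], st.2)
        else (st.1 ++ [if !st.2 then i
                       else if PySem.Chars.isupper i then PySem.Chars.lowerChar i
                       else PySem.Chars.upperChar i], st.2))
      (res, flag)).1 = res ++ pvSpec l flag := by
  induction l with
  | nil => intro res flag; simp [pvSpec]
  | cons i t ih =>
    intro res flag
    rw [List.foldl_cons]
    by_cases ha : i = 'a' ∨ i = 'A'
    · have h1 : (decide (i = 'a') || decide (i = 'A')) = true := by
        rcases ha with h | h <;> simp [h]
      have hs : pvSpec (i :: t) flag = pvSpec t (!flag) := by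
        simp only [pvSpec]; rw [if_pos h1]
      rw [hs, ← ih]
      congr 1
      simp [h1]
    · push_neg at ha
      have h1 : (decide (i = 'a') || decide (i = 'A')) = false := by simp [ha.1, ha.2]
      have hs : pvSpec (i :: t) flag = (if flag then pvFlip i else i) :: pvSpec t flag := by
        simp only [pvSpec]; rw [if_neg (by simp [h1])]
      rw [hs]
      have harr : res ++ (if flag then pvFlip i else i) :: pvSpec t flag
          = (res ++ [if flag then pvFlip i else i]) ++ pvSpec t flag := by simp
      rw [harr, ← ih]
      congr 1
      by_cases halpha : PySem.Chars.isalpha i = true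
      · cases flag <;> simp [h1, halpha, pvFlip]
      · simp only [Bool.not_eq_true] at halpha
        cases flag <;> simp [h1, halpha, pvFlip]

theorem pvEnumJ (ps : List (List Char)) : ∀ (s : Int),
    (((PySem.List.enumerate ps s).map
        (fun p => if p.1 % 2 == 0 then p.2 else p.2.map pvFlip)).flatten)
      = pvJ ps (!(s % 2 == 0)) := by
  induction ps with
  | nil => intro s; simp [PySem.List.enumerate_nil, pvJ]
  | cons p ps ih =>
    intro s
    rw [PySem.List.enumerate_cons]
    simp only [List.map_cons, List.flatten_cons, ih (s + 1), pvJ]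
    have h2 : ((s + 1) % 2 == 0) = !(s % 2 == 0) := by
      by_cases h : s % 2 = 0
      · simp [h]; omega
      · have : (s % 2 == 0) = false := by simp [h]
        rw [this]; simp; omega
    rw [h2, Bool.not_not]
    by_cases h : s % 2 = 0
    · simp [h]
    · have : (s % 2 == 0) = false := by simp [h]
      simp [this]

theorem pvSplitJ (l : List Char) : ∀ (f : Bool),
    pvJ ((l.map (fun c => if c = 'A' then 'a' else c)).splitOn 'a') f = pvSpec l f := by
  induction l with
  | nil => intro f; simp [List.splitOn, List.splitOnP_nil, pvJ, pvSpec]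
  | cons i t ih =>
    intro f
    by_cases ha : i = 'a' ∨ i = 'A'
    · have hnorm : (if i = 'A' then 'a' else i) = 'a' := by
        rcases ha with h | h <;> simp [h]
      simp only [List.map_cons, hnorm, List.splitOn, List.splitOnP_cons]
      rw [if_pos (by simp)]
      simp only [pvJ, List.map_nil, List.nil_append]
      have : pvSpec (i :: t) f = pvSpec t (!f) := by
        simp only [pvSpec]
        rw [if_pos (by rcases ha with h | h <;> simp [h])]
      rw [this]
      cases f <;> exact ih _
    · push_neg at ha
      have hnorm : (if i = 'A' then 'a' else i) = i := by simp [ha.2]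
      obtain ⟨p, ps, hps⟩ :
          ∃ p ps, (t.map (fun c => if c = 'A' then 'a' else c)).splitOnP (· == 'a') = p :: ps := by
        rcases h : (t.map (fun c => if c = 'A' then 'a' else c)).splitOnP (· == 'a') with _ | ⟨p, ps⟩
        · exact absurd h (List.splitOnP_ne_nil _ _)
        · exact ⟨p, ps, rfl⟩
      have hsplit : ((i :: t).map (fun c => if c = 'A' then 'a' else c)).splitOn 'a'
          = (i :: p) :: ps := by
        simp only [List.map_cons, hnorm, List.splitOn, List.splitOnP_cons]
        rw [if_neg (by simp [ha.1]), hps, List.modifyHead_cons]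
      have ht := ih f
      simp only [List.splitOn, hps] at ht
      have hspec : pvSpec (i :: t) f = (if f then pvFlip i else i) :: pvSpec t f := by
        simp only [pvSpec]
        rw [if_neg (by simp [ha.1, ha.2])]
      rw [hsplit, hspec, ← ht]
      cases f
      · simp [pvJ]
      · simp [pvJ]

-- ===== VERDICT (by name: the statement is the Claim_ definition above) =====
theorem fat_fingers_spec : Claim_equal_fat_fingers := by
  intro s _
  show fat_fingers s = fat_fingers_alt s
  simp only [fat_fingers, fat_fingers_alt]
  rw [pvFoldA s.toList [] false, pvEnumJ, pvSplitJ]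
  simp
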